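-- pv_equiv track=rewrite | github.com/MariZaja/datalakehouse | silver/silver_quality_flags.py | _bw_signal_quality_problem
-- ===== SOURCE A (Python) =====
-- from typing import Any, Dict, Iterator, List, Optional, Set, Tuple
--
-- def _bw_signal_quality_problem(
--     zeros: bool, flat: bool, clipping: bool, spike: bool
-- ) -> Tuple[str, str]:
--     if not any([zeros, flat, clipping, spike]):
--         return "GOOD", "NONE"
--     quality = "GOOD"
--     problems: set = set()
--     if zeros:
--         quality = "BAD"
--         problems.add("ARTIFACT")
--     if flat:
--         quality = "BAD"
--         problems.add("FLAT")
--     if clipping: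
--         quality = "BAD"
--         problems.add("CLIPPING")
--     if spike:
--         if quality == "GOOD":
--             quality = "NOISY"
--         problems.add("ARTIFACT")
--     problem_flag = next(p for p in ("FLAT", "CLIPPING", "ARTIFACT", "NONE") if p in problems)
--     return quality, problem_flag
-- ===== SOURCE B (Python) =====
-- from typing import Tuple
--
-- def _bw_signal_quality_problem(
--     zeros: bool, flat: bool, clipping: bool, spike: bool
-- ) -> Tuple[str, str]:
--     quality = "BAD" if (zeros or flat or clipping) else ("NOISY" if spike else "GOOD")
--     problem = "FLAT" if flat else ("CLIPPING" if clipping else ("ARTIFACT" if (zeros or spike) else "NONE"))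
--     return quality, problem
-- ===== Notes on version B (the rewrite author's own statement) =====
-- stated objective: simpler
-- what changed: Replaced the early return, sequential set mutations and next()-scan over a priority tuple with two closed-form conditional expressions computing quality and problem_flag directly.
import Mathlib
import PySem

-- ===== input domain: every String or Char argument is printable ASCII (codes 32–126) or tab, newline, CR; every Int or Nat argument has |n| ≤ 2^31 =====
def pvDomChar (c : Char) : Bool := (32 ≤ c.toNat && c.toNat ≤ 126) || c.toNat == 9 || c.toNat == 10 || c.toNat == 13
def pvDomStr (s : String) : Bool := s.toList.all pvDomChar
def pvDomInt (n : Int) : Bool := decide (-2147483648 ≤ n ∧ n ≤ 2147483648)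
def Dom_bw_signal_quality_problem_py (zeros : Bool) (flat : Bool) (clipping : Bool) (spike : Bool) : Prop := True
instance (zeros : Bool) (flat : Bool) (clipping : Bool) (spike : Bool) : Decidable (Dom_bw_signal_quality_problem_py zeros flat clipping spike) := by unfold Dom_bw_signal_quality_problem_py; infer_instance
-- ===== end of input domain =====

-- B replaces A's early return, set mutations and next()-priority scan with two closed-form conditionals; same values everywhere.


-- ===== PORT A =====
-- Literal port of A: early return, then sequential mutations of (quality, problems set), then next() scan.
def bw_signal_quality_problem_py (zeros : Bool) (flat : Bool) (clipping : Bool) (spike : Bool) : String × String :=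
  if !(zeros || flat || clipping || spike) then ("GOOD", "NONE")
  else
    let quality := "GOOD"
    let problems : PySem.Set String := PySem.Set.ofList []
    let (quality, problems) := if zeros then ("BAD", problems.add "ARTIFACT") else (quality, problems)
    let (quality, problems) := if flat then ("BAD", problems.add "FLAT") else (quality, problems)
    let (quality, problems) := if clipping then ("BAD", problems.add "CLIPPING") else (quality, problems)
    let (quality, problems) :=
      if spike then
        ((if quality == "GOOD" then "NOISY" else quality), problems.add "ARTIFACT")
      else (quality, problems)
    -- next(p for p in (...) if p in problems): first element of the tuple contained in the set
    let problem_flag :=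
      match (["FLAT", "CLIPPING", "ARTIFACT", "NONE"].find? (fun p => problems.contains p)) with
      | some p => p
      | none => "NONE"   -- unreachable: some flag is set on this branch (Python would raise StopIteration)
    (quality, problem_flag)

-- ===== PORT B =====
-- Port of B: two closed-form conditionals.
def bw_signal_quality_problem_py_alt (zeros : Bool) (flat : Bool) (clipping : Bool) (spike : Bool) : String × String :=
  (if zeros || flat || clipping then "BAD" else if spike then "NOISY" else "GOOD",
   if flat then "FLAT" else if clipping then "CLIPPING" else if zeros || spike then "ARTIFACT" else "NONE")

-- ===== PRECONDITION & SPEC =====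
def Spec_bw_signal_quality_problem_py (zeros : Bool) (flat : Bool) (clipping : Bool) (spike : Bool) (out : String × String) : Prop := out = bw_signal_quality_problem_py_alt zeros flat clipping spike
instance (zeros : Bool) (flat : Bool) (clipping : Bool) (spike : Bool) (out : String × String) : Decidable (Spec_bw_signal_quality_problem_py zeros flat clipping spike out) := by unfold Spec_bw_signal_quality_problem_py; infer_instance

-- ===== CLAIM (what is proved, stated in full; the proofs are below) =====
def Claim_equal_bw_signal_quality_problem_py : Prop := ∀ (zeros : Bool) (flat : Bool) (clipping : Bool) (spike : Bool), Dom_bw_signal_quality_problem_py zeros flat clipping spike → Spec_bw_signal_quality_problem_py zeros flat clipping spike (bw_signal_quality_problem_py zeros flat clipping spike)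

-- ===== LEMMAS AND PROOFS =====

-- ===== VERDICT (by name: the statement is the Claim_ definition above) =====
theorem bw_signal_quality_problem_py_spec : Claim_equal_bw_signal_quality_problem_py := by
  unfold Claim_equal_bw_signal_quality_problem_py; decide
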